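-- pv_equiv track=rewrite | github.com/stuentofe/workbook_api | main.py | get_valid_4_chunk_combinations
-- ===== SOURCE A (Python) =====
-- from typing import List, Dict
--
-- def get_valid_4_chunk_combinations(n: int) -> List[List[int]]:
--     result: List[List[int]] = []
--
--     def dfs(current: List[int], total: int) -> None:
--         if len(current) == 4 and total == n:
--             result.append(current[:])
--             return
--         if len(current) >= 4 or total >= n:
--             return
--         max_chunk_size = 3 if n >= 9 else 2
--         for i in range(1, max_chunk_size + 1):
--             dfs(current + [i], total + i)
--
--     dfs([], 0)
--     return result
-- ===== SOURCE B (Python) =====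
-- from typing import List
--
--
-- def get_valid_4_chunk_combinations(n: int) -> List[List[int]]:
--     max_chunk_size = 3 if n >= 9 else 2
--     r = range(1, max_chunk_size + 1)
--     return [[i, j, k, l]
--             for i in r for j in r for k in r for l in r
--             if i + j + k + l == n]
-- ===== Notes on version B (the rewrite author's own statement) =====
-- stated objective: simpler
-- what changed: Replaced the recursive DFS with explicit pruning and a mutated accumulator by a single flat four-variable comprehension over range(1, max_chunk_size+1) filtered on i+j+k+l == n, which yields the same lexicographic order.
import Mathlib
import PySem

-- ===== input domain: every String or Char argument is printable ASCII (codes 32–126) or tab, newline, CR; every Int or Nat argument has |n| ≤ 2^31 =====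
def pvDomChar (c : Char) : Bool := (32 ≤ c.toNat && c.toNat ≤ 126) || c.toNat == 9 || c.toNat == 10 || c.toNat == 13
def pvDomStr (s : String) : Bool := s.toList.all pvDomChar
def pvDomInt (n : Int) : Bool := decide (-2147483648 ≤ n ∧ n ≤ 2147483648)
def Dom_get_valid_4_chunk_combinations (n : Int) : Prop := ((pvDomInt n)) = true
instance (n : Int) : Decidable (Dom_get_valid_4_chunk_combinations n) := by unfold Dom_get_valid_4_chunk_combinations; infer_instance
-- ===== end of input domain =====

-- B replaces A's recursive DFS (with pruning) by a flat four-deep comprehension over the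
-- same chunk range filtered on the exact sum; objective: simpler, same result order.

-- ===== PORT A =====
-- A's inner `dfs` with its mutable `result` accumulator threaded explicitly; the `for i in
-- range(1, max_chunk_size+1)` loop is the helper pvLoop over PySem.List.pyRange.
mutual
def pvDfs (n : Int) (current : List Int) (total : Int) (acc : List (List Int)) :
    List (List Int) :=
  if current.length = 4 ∧ total = n then acc ++ [current]
  else if h : 4 ≤ current.length ∨ n ≤ total then acc
  else
    pvLoop n current total acc
      (PySem.List.pyRange 1 ((if 9 ≤ n then (3 : Int) else 2) + 1) 1) (by omega)
termination_by (2 * (4 - current.length) + 1, 0)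

def pvLoop (n : Int) (current : List Int) (total : Int) (acc : List (List Int))
    (xs : List Int) (h : current.length < 4) : List (List Int) :=
  match xs with
  | [] => acc
  | i :: rest => pvLoop n current total (pvDfs n (current ++ [i]) (total + i) acc) rest h
termination_by (2 * (4 - current.length), xs.length)
end

def get_valid_4_chunk_combinations (n : Int) : List (List Int) :=
  pvDfs n [] 0 []

-- ===== PORT B =====
-- Source B's comprehension: r = range(1, max_chunk_size+1); [[i,j,k,l] for i,j,k,l in r⁴ if sum == n]
def pvComb (n : Int) (r : List Int) : List (List Int) :=
  r.flatMap (fun i => r.flatMap (fun j => r.flatMap (fun k =>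
    (r.filter (fun l => i + j + k + l == n)).map (fun l => [i, j, k, l]))))

def get_valid_4_chunk_combinations_alt (n : Int) : List (List Int) :=
  pvComb n (PySem.List.pyRange 1 ((if 9 ≤ n then (3 : Int) else 2) + 1) 1)

-- ===== PRECONDITION & SPEC =====
def Spec_get_valid_4_chunk_combinations (n : Int) (out : List (List Int)) : Prop := out = get_valid_4_chunk_combinations_alt n
instance (n : Int) (out : List (List Int)) : Decidable (Spec_get_valid_4_chunk_combinations n out) := by unfold Spec_get_valid_4_chunk_combinations; infer_instance

-- ===== CLAIM (what is proved, stated in full; the proofs are below) =====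
def Claim_equal_get_valid_4_chunk_combinations : Prop := ∀ (n : Int), Dom_get_valid_4_chunk_combinations n → Spec_get_valid_4_chunk_combinations n (get_valid_4_chunk_combinations n)

-- ===== LEMMAS AND PROOFS =====

-- B returns [] when n is out of the reachable sum range [4,12].
lemma pvComb_nil (n : Int) (r : List Int) (hr : ∀ x ∈ r, 1 ≤ x ∧ x ≤ 3)
    (hn : n ≤ 3 ∨ 13 ≤ n) : pvComb n r = [] := by
  unfold pvComb
  simp only [List.flatMap_eq_nil_iff, List.map_eq_nil_iff, List.filter_eq_nil_iff,
    beq_iff_eq]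
  intro i hi j hj k hk l hl
  have := hr i hi; have := hr j hj; have := hr k hk; have := hr l hl
  omega

lemma alt_nil (n : Int) (hn : n ≤ 3 ∨ 13 ≤ n) :
    get_valid_4_chunk_combinations_alt n = [] := by
  unfold get_valid_4_chunk_combinations_alt
  apply pvComb_nil _ _ _ hn
  intro x hx
  rw [PySem.List.mem_pyRange_one] at hx
  split_ifs at hx <;> omega

-- A's DFS leaves acc unchanged for n ≥ 13: intermediate totals stay ≤ 3·len ≤ 12 < n.
lemma pvDfs_hi (n : Int) (hn : 13 ≤ n) :
    ∀ (d : Nat) (cur : List Int) (total : Int) (acc : List (List Int)),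
      cur.length + d = 4 → total ≤ 3 * cur.length → pvDfs n cur total acc = acc := by
  intro d
  induction d with
  | zero =>
    intro cur total acc hlen htot
    rw [pvDfs]
    rw [if_neg (by rintro ⟨h4, ht⟩; omega), dif_pos (by omega)]
  | succ d ih =>
    intro cur total acc hlen htot
    rw [pvDfs]
    rw [if_neg (by rintro ⟨h4, ht⟩; omega), dif_neg (by rintro (h | h) <;> omega)]
    rw [if_pos (by omega : (9:Int) ≤ n)]
    have hr : PySem.List.pyRange 1 ((3:Int) + 1) 1 = [1, 2, 3] := by decide
    rw [hr]
    simp only [pvLoop]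
    rw [ih (cur ++ [3]) _ _ (by simp [List.length_append]; omega)
          (by simp [List.length_append]; omega),
        ih (cur ++ [2]) _ _ (by simp [List.length_append]; omega)
          (by simp [List.length_append]; omega),
        ih (cur ++ [1]) _ _ (by simp [List.length_append]; omega)
          (by simp [List.length_append]; omega)]

-- ===== VERDICT (by name: the statement is the Claim_ definition above) =====
set_option maxRecDepth 10000 in
theorem get_valid_4_chunk_combinations_spec : Claim_equal_get_valid_4_chunk_combinations := by
  intro n _hdom
  unfold Spec_get_valid_4_chunk_combinations
  by_cases h13 : 13 ≤ n
  · rw [alt_nil n (Or.inr h13)]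
    unfold get_valid_4_chunk_combinations
    exact pvDfs_hi n h13 4 [] 0 [] rfl (by simp)
  · by_cases h0 : n ≤ 0
    · rw [alt_nil n (Or.inl (by omega))]
      unfold get_valid_4_chunk_combinations
      rw [pvDfs]
      rw [if_neg (by rintro ⟨h4, _⟩; simp at h4), dif_pos (Or.inr h0)]
    · have h1 : 1 ≤ n := by omega
      have h2 : n ≤ 12 := by omega
      have hr2 : PySem.List.pyRange 1 3 1 = [1, 2] := by decide
      have hr3 : PySem.List.pyRange 1 4 1 = [1, 2, 3] := by decide
      interval_cases n <;>
        simp [get_valid_4_chunk_combinations, get_valid_4_chunk_combinations_alt,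
          pvComb, pvDfs, pvLoop, hr2, hr3]
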